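-- pv_equiv track=rewrite | github.com/jmsung/einstein | scripts/difference_bases/sidon_R_enumeration.py | enumerate_sidon_rulers_4mark
-- ===== SOURCE A (Python) =====
-- def is_sidon(R):
--     """A set is Sidon iff all pairwise positive differences are distinct."""
--     R = sorted(R)
--     diffs = []
--     for i in range(len(R)):
--         for j in range(i):
--             diffs.append(R[i] - R[j])
--     return len(set(diffs)) == len(diffs)
--
-- def enumerate_sidon_rulers_4mark(c_max=12):
--     """Enumerate 4-mark Sidon rulers with all marks in [0, c_max]."""
--     rulers = []
--     for a in range(1, c_max + 1):
--         for b in range(a + 1, c_max + 1):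
--             for c in range(b + 1, c_max + 1):
--                 R = (0, a, b, c)
--                 if is_sidon(R):
--                     rulers.append(R)
--     return rulers
-- ===== SOURCE B (Python) =====
-- def enumerate_sidon_rulers_4mark(c_max=12):
--     """Enumerate 4-mark Sidon rulers with all marks in [0, c_max].
--
--     Incremental construction: the positive differences used by the marks
--     chosen so far are kept in a running set across the nested loops; each
--     new mark only has to contribute fresh differences, so no full per-triple
--     Sidon test is needed.
--     """
--     rulers = []
--     for a in range(1, c_max + 1):
--         used = {a}
--         for b in range(a + 1, c_max + 1):
--             new_b = (b, b - a)
--             if len(set(new_b)) != 2 or any(d in used for d in new_b):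
--                 continue
--             with_b = used | set(new_b)
--             for c in range(b + 1, c_max + 1):
--                 new_c = (c, c - a, c - b)
--                 if len(set(new_c)) == 3 and all(d not in with_b for d in new_c):
--                     rulers.append((0, a, b, c))
--     return rulers
-- ===== Notes on version B (the rewrite author's own statement) =====
-- stated objective: alternative
-- what changed: Replaced the per-triple is_sidon call (sort the four marks, build all six pairwise differences, compare set size with list size) by an incremental construction that keeps one running set of used positive differences across the nested loops: each new mark b or c only has to contribute differences fresh to that set, and a clashing b skips its whole c-loop.
import Mathlib
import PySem

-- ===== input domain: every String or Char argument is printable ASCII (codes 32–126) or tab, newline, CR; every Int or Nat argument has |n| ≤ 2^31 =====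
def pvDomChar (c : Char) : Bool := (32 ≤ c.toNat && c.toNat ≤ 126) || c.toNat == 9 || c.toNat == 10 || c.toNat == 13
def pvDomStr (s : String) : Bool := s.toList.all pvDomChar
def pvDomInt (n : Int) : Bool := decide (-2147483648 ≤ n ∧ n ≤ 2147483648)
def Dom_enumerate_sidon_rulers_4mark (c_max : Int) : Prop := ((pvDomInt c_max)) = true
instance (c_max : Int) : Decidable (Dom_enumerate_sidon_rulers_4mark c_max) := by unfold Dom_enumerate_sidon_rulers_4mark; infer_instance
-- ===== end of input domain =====

-- B replaces A's per-triple is_sidon test (sort, build all pairwise differences, compare set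
-- size against list size) by an incremental construction: a running set of the positive
-- differences already used is kept across the nested loops, each new mark only contributes
-- fresh differences, and a clashing b skips its whole c-loop. Same return value.

-- ===== PORT A =====
def is_sidon (R : List Int) : Bool :=
  let R := PySem.List.sorted R (fun x => x) false
  let diffs : List Int :=
    (PySem.List.pyRange 0 (R.length : Int) 1).foldl (fun diffs i =>
      (PySem.List.pyRange 0 i 1).foldl (fun diffs j =>
        diffs ++ [PySem.List.pyGetD R i 0 - PySem.List.pyGetD R j 0]) diffs) []
  (PySem.Set.ofList diffs).length == diffs.length

def enumerate_sidon_rulers_4mark (c_max : Int) : List (Int × Int × Int × Int) :=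
  (PySem.List.pyRange 1 (c_max + 1) 1).foldl (fun rulers a =>
    (PySem.List.pyRange (a + 1) (c_max + 1) 1).foldl (fun rulers b =>
      (PySem.List.pyRange (b + 1) (c_max + 1) 1).foldl (fun rulers c =>
        if is_sidon [0, a, b, c] then rulers ++ [(0, a, b, c)] else rulers)
        rulers) rulers) []

-- ===== PORT B =====
def enumerate_sidon_rulers_4mark_alt (c_max : Int) : List (Int × Int × Int × Int) :=
  (PySem.List.pyRange 1 (c_max + 1) 1).foldl (fun rulers a =>
    let used : PySem.Set Int := PySem.Set.ofList [a]
    (PySem.List.pyRange (a + 1) (c_max + 1) 1).foldl (fun rulers b =>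
      let new_b : List Int := [b, b - a]
      if PySem.Set.len (PySem.Set.ofList new_b) != 2
          || new_b.any (fun d => PySem.Set.contains used d) then rulers
      else
        let with_b := PySem.Set.union used (PySem.Set.ofList new_b)
        (PySem.List.pyRange (b + 1) (c_max + 1) 1).foldl (fun rulers c =>
          let new_c : List Int := [c, c - a, c - b]
          if PySem.Set.len (PySem.Set.ofList new_c) == 3
              && new_c.all (fun d => !PySem.Set.contains with_b d) then
            rulers ++ [(0, a, b, c)]
          else rulers) rulers) rulers) []

-- ===== PRECONDITION & SPEC =====
def Spec_enumerate_sidon_rulers_4mark (c_max : Int) (out : List (Int × Int × Int × Int)) : Prop := out = enumerate_sidon_rulers_4mark_alt c_max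
instance (c_max : Int) (out : List (Int × Int × Int × Int)) : Decidable (Spec_enumerate_sidon_rulers_4mark c_max out) := by unfold Spec_enumerate_sidon_rulers_4mark; infer_instance

-- ===== CLAIM (what is proved, stated in full; the proofs are below) =====
def Claim_equal_enumerate_sidon_rulers_4mark : Prop := ∀ (c_max : Int), Dom_enumerate_sidon_rulers_4mark c_max → Spec_enumerate_sidon_rulers_4mark c_max (enumerate_sidon_rulers_4mark c_max)

-- ===== LEMMAS AND PROOFS =====

theorem len_ofList_eq_iff_nodup (l : List Int) :
    ((PySem.Set.ofList l).length = l.length) ↔ l.Nodup := by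
  induction l using List.reverseRecOn with
  | nil => simp [PySem.Set.ofList_nil]
  | append_singleton xs x ih =>
    rw [PySem.Set.ofList_append_singleton, PySem.Set.add_eq_ite]
    by_cases hx : x ∈ PySem.Set.ofList xs
    · have hmem : x ∈ xs := (PySem.Set.mem_ofList _ _).1 hx
      have hle := PySem.Set.length_ofList_le (xs := xs)
      rw [if_pos hx]
      constructor
      · intro h
        exfalso
        rw [List.length_append] at h
        simp only [List.length_singleton] at h
        omega
      · intro h
        exact (((List.nodup_append.mp h).2.2 x hmem x (List.mem_singleton_self x)) rfl).elim
    · have hmem : x ∉ xs := fun h => hx ((PySem.Set.mem_ofList _ _).2 h)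
      rw [if_neg hx, List.length_append, List.length_append]
      simp only [List.length_singleton]
      constructor
      · intro h
        refine List.nodup_append.mpr ⟨ih.1 (by omega), List.nodup_singleton x, ?_⟩
        intro y hy z hz
        rw [List.mem_singleton] at hz
        subst hz
        exact fun he => hmem (he ▸ hy)
      · intro h
        have := ih.2 (List.nodup_append.mp h).1
        omega

theorem is_sidon_char (a b c : Int) (ha : 0 < a) (hab : a < b) (hbc : b < c) :
    is_sidon [0, a, b, c] =
      decide ([a, b, b - a, c, c - a, c - b].Nodup) := by
  have hp : List.Pairwise (fun x y : Int => x ≤ y) [0, a, b, c] := by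
    refine List.Pairwise.cons ?_ (List.Pairwise.cons ?_ (List.Pairwise.cons ?_ (List.Pairwise.cons ?_ List.Pairwise.nil)))
    all_goals intro y hy
    all_goals simp only [List.mem_cons, List.not_mem_nil, or_false] at hy
    · rcases hy with rfl|rfl|rfl <;> omega
    · rcases hy with rfl|rfl <;> omega
    · rcases hy with rfl; omega
  have hsorted : PySem.List.sorted [0, a, b, c] (fun x => x) false = [0, a, b, c] :=
    PySem.List.sorted_eq_self_of_pairwise _ _ hp
  unfold is_sidon
  rw [hsorted]
  have h0 : Int.toNat 0 = 0 := rfl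
  have h1 : Int.toNat 1 = 1 := rfl
  have h2 : Int.toNat 2 = 2 := rfl
  have h3 : Int.toNat 3 = 3 := rfl
  have h4 : Int.toNat 4 = 4 := rfl
  norm_num [h0, h1, h2, h3, h4, PySem.List.pyRange, PySem.List.pyGetD, PySem.List.pyGet?, PySem.List.pyIdx?, List.range_succ]
  rw [Bool.eq_iff_iff]
  rw [show (6:Nat) = ([a, b, b - a, c, c - a, c - b] : List Int).length from rfl]
  simp only [beq_iff_eq, len_ofList_eq_iff_nodup, Bool.and_eq_true, Bool.not_eq_true',
    decide_eq_false_iff_not, List.nodup_cons, List.mem_cons,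
    List.not_mem_nil, or_false, List.nodup_nil, and_true, not_or, sub_left_inj, sub_right_inj,
    not_false_iff]

theorem pair_len_eq (x y : Int) :
    (PySem.Set.len (PySem.Set.ofList [x, y]) == 2) = decide (([x, y] : List Int).Nodup) := by
  have h := len_ofList_eq_iff_nodup ([x, y] : List Int)
  rw [Bool.eq_iff_iff]
  simp only [beq_iff_eq, decide_eq_true_eq]
  constructor
  · intro hlen
    have hl : ((PySem.Set.ofList [x, y]).length : Int) = 2 := hlen
    have h2 : ([x, y] : List Int).length = 2 := rfl
    exact h.1 (by omega)
  · intro hnd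
    have hl := h.2 hnd
    have h2 : ([x, y] : List Int).length = 2 := rfl
    show ((PySem.Set.ofList [x, y]).length : Int) = 2
    omega

theorem triple_len_eq (x y z : Int) :
    (PySem.Set.len (PySem.Set.ofList [x, y, z]) == 3) = decide (([x, y, z] : List Int).Nodup) := by
  have h := len_ofList_eq_iff_nodup ([x, y, z] : List Int)
  rw [Bool.eq_iff_iff]
  simp only [beq_iff_eq, decide_eq_true_eq]
  constructor
  · intro hlen
    have hl : ((PySem.Set.ofList [x, y, z]).length : Int) = 3 := hlen
    have h2 : ([x, y, z] : List Int).length = 3 := rfl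
    exact h.1 (by omega)
  · intro hnd
    have hl := h.2 hnd
    have h2 : ([x, y, z] : List Int).length = 3 := rfl
    show ((PySem.Set.ofList [x, y, z]).length : Int) = 3
    omega

theorem ports_agree (c_max : Int) :
    enumerate_sidon_rulers_4mark c_max = enumerate_sidon_rulers_4mark_alt c_max := by
  unfold enumerate_sidon_rulers_4mark enumerate_sidon_rulers_4mark_alt
  apply PySem.List.foldl_congr_mem
  intro rulers a hma
  have ha : 1 ≤ a ∧ a < c_max + 1 := PySem.List.mem_pyRange_one.1 hma
  apply PySem.List.foldl_congr_mem
  intro rulers b hmb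
  have hb : a + 1 ≤ b ∧ b < c_max + 1 := PySem.List.mem_pyRange_one.1 hmb
  have hofa : PySem.Set.ofList [a] = [a] := rfl
  have hguard : (PySem.Set.len (PySem.Set.ofList [b, b - a]) != 2
      || ([b, b - a] : List Int).any (fun d => PySem.Set.contains (PySem.Set.ofList [a]) d)) = true
      ↔ (b = a ∨ b - a = a ∨ b = b - a) := by
    rw [show (PySem.Set.len (PySem.Set.ofList [b, b - a]) != 2)
        = !(PySem.Set.len (PySem.Set.ofList [b, b - a]) == 2) from rfl, pair_len_eq, hofa]
    simp only [List.any_cons, List.any_nil, Bool.or_false,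
      PySem.Set.contains_eq_listContains, List.contains_cons, List.contains_nil,
      Bool.or_eq_true, Bool.not_eq_true', decide_eq_false_iff_not, beq_iff_eq,
      List.nodup_cons, List.mem_cons, List.not_mem_nil, or_false, List.nodup_nil,
      and_true, not_false_iff]
    omega
  by_cases hcol : b = a ∨ b - a = a ∨ b = b - a
  · rw [if_pos (hguard.2 hcol)]
    refine Eq.trans ?_ (List.foldl_fixed (a := rulers) (PySem.List.pyRange (b + 1) (c_max + 1) 1))
    apply PySem.List.foldl_congr_mem
    intro rulers' c hmc
    have hc : b + 1 ≤ c ∧ c < c_max + 1 := PySem.List.mem_pyRange_one.1 hmc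
    rw [is_sidon_char a b c (by omega) (by omega) (by omega)]
    rw [if_neg (by
      simp only [decide_eq_true_eq, List.nodup_cons, List.mem_cons, List.not_mem_nil,
        or_false, not_or, List.nodup_nil, and_true]
      omega)]
  · rw [if_neg (fun h => hcol (hguard.1 h))]
    rw [not_or, not_or] at hcol
    have hofbb : PySem.Set.ofList ([b, b - a] : List Int) = [b, b - a] := by
      show PySem.Set.add (PySem.Set.add (PySem.Set.ofList ([] : List Int)) b) (b - a) = [b, b - a]
      rw [PySem.Set.ofList_nil]
      rw [show PySem.Set.add ([] : PySem.Set Int) b = [b] from rfl]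
      exact PySem.Set.add_of_not_mem (by
        rw [List.mem_singleton]
        exact fun h => hcol.2.2 h.symm)
    have hwith : PySem.Set.union (PySem.Set.ofList [a]) (PySem.Set.ofList ([b, b - a] : List Int))
        = [a, b, b - a] := by
      rw [hofbb]
      show PySem.Set.add (PySem.Set.add (PySem.Set.ofList [a]) b) (b - a) = [a, b, b - a]
      have hab : PySem.Set.add ([a] : PySem.Set Int) b = [a, b] :=
        PySem.Set.add_of_not_mem (by
          rw [List.mem_singleton]
          exact hcol.1)
      rw [hofa, hab]
      exact PySem.Set.add_of_not_mem (by
        simp only [List.mem_cons, List.not_mem_nil, or_false, not_or]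
        exact ⟨hcol.2.1, fun h => hcol.2.2 h.symm⟩)
    rw [hwith]
    apply PySem.List.foldl_congr_mem
    intro rulers' c hmc
    have hc : b + 1 ≤ c ∧ c < c_max + 1 := PySem.List.mem_pyRange_one.1 hmc
    rw [is_sidon_char a b c (by omega) (by omega) (by omega)]
    have hcond : decide (([a, b, b - a, c, c - a, c - b] : List Int).Nodup) =
        (PySem.Set.len (PySem.Set.ofList [c, c - a, c - b]) == 3
          && ([c, c - a, c - b] : List Int).all (fun d => !PySem.Set.contains ([a, b, b - a] : PySem.Set Int) d)) := by
      rw [triple_len_eq, Bool.eq_iff_iff]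
      simp only [decide_eq_true_eq, List.nodup_cons, List.mem_cons, List.not_mem_nil,
        or_false, not_or, List.nodup_nil, and_true, not_false_iff,
        List.all_cons, List.all_nil, Bool.and_true, Bool.and_eq_true,
        PySem.Set.contains_eq_listContains, List.contains_cons, List.contains_nil,
        Bool.or_false, Bool.not_eq_true', Bool.or_eq_false_iff,
        beq_eq_false_iff_ne, ne_eq, decide_eq_true_eq]
      omega
    rw [hcond]

-- ===== VERDICT (by name: the statement is the Claim_ definition above) =====
theorem enumerate_sidon_rulers_4mark_spec : Claim_equal_enumerate_sidon_rulers_4mark := by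
  intro c_max _
  unfold Spec_enumerate_sidon_rulers_4mark
  exact ports_agree c_max
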